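-- pv_equiv track=rewrite | github.com/pokerdio/generic | euler/euler-539.py | s_rec
-- ===== SOURCE A (Python) =====
-- def p_rec(n):
--     if n <= 2:
--         return n
--     return (2 * (n // 2 + 1 - p_rec(n // 2))) % 987654321
--
-- def s_rec(n):
--     if n == 1:
--         return 1
--     r = 0
--     if n % 2:
--         r = p_rec(n)
--         n -= 1
--     n2 = n // 2
--     return (r + 2 * n2 * (n2 + 3) - 4 * s_rec(n2) - p_rec(n + 1) + 1) % 987654321
-- ===== SOURCE B (Python) =====
-- def p_rec(n):
--     # iterative: descend n, n//2, ... to the base, then fold back up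
--     levels = []
--     while n > 2:
--         levels.append(n)
--         n //= 2
--     p = n
--     for m in reversed(levels):
--         p = (2 * (m // 2 + 1 - p)) % 987654321
--     return p
--
-- def s_rec(n):
--     # iterative: record each level down to 1, then fold back up
--     levels = []
--     while n != 1:
--         levels.append(n)
--         n = (n - n % 2) // 2
--     s = 1
--     for m in reversed(levels):
--         r = p_rec(m) if m % 2 else 0
--         me = m - m % 2
--         n2 = me // 2
--         s = (r + 2 * n2 * (n2 + 3) - 4 * s - p_rec(me + 1) + 1) % 987654321
--     return s
-- ===== Notes on version B (the rewrite author's own statement) =====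
-- stated objective: alternative
-- what changed: Both recursions are replaced by explicit-stack iteration: the loop pushes the successive levels down to the base and a second loop folds the same modular formula back upward; no recursive calls remain.
-- outside the precondition, e.g. on s_rec(0): A raises RecursionError, B does not finish within the time limit
import Mathlib
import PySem

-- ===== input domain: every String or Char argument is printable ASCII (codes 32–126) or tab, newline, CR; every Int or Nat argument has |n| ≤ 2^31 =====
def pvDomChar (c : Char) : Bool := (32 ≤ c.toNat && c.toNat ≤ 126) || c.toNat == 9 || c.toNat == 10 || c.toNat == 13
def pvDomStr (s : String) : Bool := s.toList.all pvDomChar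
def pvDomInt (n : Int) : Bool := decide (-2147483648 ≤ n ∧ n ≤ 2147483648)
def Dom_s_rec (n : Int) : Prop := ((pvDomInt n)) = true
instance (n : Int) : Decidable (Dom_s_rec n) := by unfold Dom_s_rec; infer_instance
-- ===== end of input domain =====

-- B replaces both recursions by explicit-stack iteration (descend, then fold back up); alternative decomposition, same cost.

-- ===== PORT A =====
-- p_rec, recursive as in the Python (total: the recursive call only happens for 2 < n)
def p_rec (n : Int) : Int :=
  if n ≤ 2 then n
  else PySem.Int.mod (2 * (PySem.Int.floordiv n 2 + 1 - p_rec (PySem.Int.floordiv n 2))) 987654321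
termination_by n.toNat
decreasing_by
  rename_i h
  rw [PySem.Int.floordiv_eq_ediv_of_pos (by omega)]
  omega

-- s_rec recurses via s_rec((n - n%2)//2); fuel makes it total (for n ≤ 0 the Python never returns);
-- fuel n.toNat is always sufficient on the admitted inputs (1 ≤ n).
def s_recF : Nat → Int → Int
  | 0, _ => 0
  | f+1, n =>
    if n = 1 then 1
    else
      let r  := if PySem.Int.mod n 2 ≠ 0 then p_rec n else 0
      let n' := if PySem.Int.mod n 2 ≠ 0 then n - 1 else n
      let n2 := PySem.Int.floordiv n' 2
      PySem.Int.mod (r + 2 * n2 * (n2 + 3) - 4 * s_recF f n2 - p_rec (n' + 1) + 1) 987654321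

def s_rec (n : Int) : Int := s_recF n.toNat n

-- ===== PORT B =====
-- while n > 2: push n; n //= 2  — returns the pushed levels and the final (base) n
def pDown (n : Int) : List Int × Int :=
  if 2 < n then
    let rest := pDown (PySem.Int.floordiv n 2)
    (n :: rest.1, rest.2)
  else ([], n)
termination_by n.toNat
decreasing_by
  rename_i h
  rw [PySem.Int.floordiv_eq_ediv_of_pos (by omega)]
  omega

-- iterative p_rec: fold the update upward over the reversed stack
def p_it (n : Int) : Int :=
  let d := pDown n
  (d.1.reverse).foldl
    (fun p m => PySem.Int.mod (2 * (PySem.Int.floordiv m 2 + 1 - p)) 987654321) d.2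

-- while n != 1: push n; n = (n - n%2)//2  (fuel: the Python loop never ends for n ≤ 0)
def sDown : Nat → Int → List Int
  | 0, _ => []
  | f+1, n =>
    if n ≠ 1 then n :: sDown f (PySem.Int.floordiv (n - PySem.Int.mod n 2) 2) else []

-- one upward step of the fold
def sStep (s m : Int) : Int :=
  let r  := if PySem.Int.mod m 2 ≠ 0 then p_it m else 0
  let me := m - PySem.Int.mod m 2
  let n2 := PySem.Int.floordiv me 2
  PySem.Int.mod (r + 2 * n2 * (n2 + 3) - 4 * s - p_it (me + 1) + 1) 987654321

def s_rec_alt (n : Int) : Int := ((sDown n.toNat n).reverse).foldl sStep 1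

-- ===== PRECONDITION & SPEC =====
-- Pre_ excludes n ≤ 0, where the Python A never returns (infinite recursion → RecursionError).
def Pre_s_rec (n : Int) : Prop := 1 ≤ n
instance (n : Int) : Decidable (Pre_s_rec n) := by unfold Pre_s_rec; infer_instance
def pvWitness_s_rec : Int := 6

def Spec_s_rec (n : Int) (out : Int) : Prop := out = s_rec_alt n
instance (n : Int) (out : Int) : Decidable (Spec_s_rec n out) := by unfold Spec_s_rec; infer_instance

-- ===== CLAIM (what is proved, stated in full; the proofs are below) =====
def Claim_equal_s_rec : Prop := ∀ (n : Int), Dom_s_rec n → Pre_s_rec n → Spec_s_rec n (s_rec n)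

-- ===== LEMMAS AND PROOFS =====

theorem p_it_eq (n : Int) : p_it n = p_rec n := by
  by_cases h : n ≤ 2
  · rw [p_it, pDown, p_rec]
    simp [h, not_lt.mpr h]
  · have h2 : 2 < n := not_le.mp h
    have ih := p_it_eq (PySem.Int.floordiv n 2)
    have hp : pDown n = (n :: (pDown (PySem.Int.floordiv n 2)).1,
        (pDown (PySem.Int.floordiv n 2)).2) := by
      rw [pDown]; simp [h2]
    rw [p_it] at ih
    rw [p_it, hp]
    simp only [List.reverse_cons, List.foldl_append, List.foldl_cons, List.foldl_nil]
    rw [ih]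
    conv_rhs => rw [p_rec]
    simp [h]
termination_by n.toNat
decreasing_by
  rw [PySem.Int.floordiv_eq_ediv_of_pos (by omega)]
  omega

theorem sDown_foldl (f : Nat) : ∀ n : Int, 1 ≤ n → n.toNat ≤ f →
    ((sDown f n).reverse).foldl sStep 1 = s_recF f n := by
  induction f with
  | zero => intro n h1 h2; omega
  | succ f ih =>
    intro n h1 h2
    by_cases hn : n = 1
    · subst hn; simp [sDown, s_recF]
    · have hmod : PySem.Int.mod n 2 = n % 2 := PySem.Int.mod_eq_emod_of_pos (by omega)
      have hdiv : PySem.Int.floordiv (n - PySem.Int.mod n 2) 2 = (n - n % 2) / 2 := by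
        rw [hmod, PySem.Int.floordiv_eq_ediv_of_pos (by omega)]
      set m2 := PySem.Int.floordiv (n - PySem.Int.mod n 2) 2 with hm2
      have hm2b : 1 ≤ m2 ∧ m2 < n := by rw [hdiv]; omega
      have hrec := ih m2 hm2b.1 (by omega)
      rw [sDown]
      simp only [ne_eq, hn, not_false_eq_true, if_pos, List.reverse_cons,
        List.foldl_append, List.foldl_cons, List.foldl_nil]
      -- now show sStep (s_recF f m2) n = s_recF (f+1) n
      rw [s_recF]
      simp only [if_neg hn]
      rw [List.foldl_reverse] at hrec
      by_cases ho : PySem.Int.mod n 2 = 0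
      · have hm2e : m2 = n / 2 := by omega
        simp only [sStep, ho, p_it_eq]
        norm_num
        rw [← hm2e, hrec]
      · have h1m : PySem.Int.mod n 2 = 1 := by omega
        have hm2e : m2 = (n - 1) / 2 := by omega
        simp only [sStep, h1m, p_it_eq]
        norm_num
        rw [← hm2e, hrec]

-- ===== VERDICT (by name: the statement is the Claim_ definition above) =====
theorem s_rec_spec : Claim_equal_s_rec := by
  intro n _ hpre
  unfold Spec_s_rec s_rec s_rec_alt
  exact (sDown_foldl n.toNat n hpre le_rfl).symm
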